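-- pv_equiv track=rewrite | github.com/Payer10/codeforces-problem-solutions | D. Distinct Split.py | Distinct_split
-- ===== SOURCE A (Python) =====
-- def Distinct_split(n,s):
--     a=len(set(s))
--     li=[]
--     for i in range(n):
--         if s[i] not in li:
--             a=max(a,len(set(s[:i+1]))+len(set(s[i+1:])))
--             li.append(s[i])
--     return a
-- ===== SOURCE B (Python) =====
-- def Distinct_split(n, s):
--     m = len(s)
--     # prefix distinct counts: pref[i] = number of distinct chars in s[:i+1]
--     pref = []
--     seen = set()
--     for c in s:
--         seen.add(c)
--         pref.append(len(seen))
--     # suffix distinct counts: suf[i] = number of distinct chars in s[i:]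
--     suf = [0]
--     seen = set()
--     for c in reversed(s):
--         seen.add(c)
--         suf.append(len(seen))
--     suf.reverse()
--     best = suf[0]
--     prev = 0
--     for i in range(m):
--         if pref[i] > prev:      # i is a first occurrence
--             prev = pref[i]
--             if i < n:
--                 best = max(best, pref[i] + suf[i + 1])
--     return best
-- ===== Notes on version B (the rewrite author's own statement) =====
-- stated objective: alternative
-- what changed: A rebuilds set(s[:i+1]) and set(s[i+1:]) from scratch at each first-occurrence index; B precomputes prefix and suffix distinct counts in two linear scans, detects first occurrences by the prefix count increasing, and takes the max in one more pass.
import Mathlib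
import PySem

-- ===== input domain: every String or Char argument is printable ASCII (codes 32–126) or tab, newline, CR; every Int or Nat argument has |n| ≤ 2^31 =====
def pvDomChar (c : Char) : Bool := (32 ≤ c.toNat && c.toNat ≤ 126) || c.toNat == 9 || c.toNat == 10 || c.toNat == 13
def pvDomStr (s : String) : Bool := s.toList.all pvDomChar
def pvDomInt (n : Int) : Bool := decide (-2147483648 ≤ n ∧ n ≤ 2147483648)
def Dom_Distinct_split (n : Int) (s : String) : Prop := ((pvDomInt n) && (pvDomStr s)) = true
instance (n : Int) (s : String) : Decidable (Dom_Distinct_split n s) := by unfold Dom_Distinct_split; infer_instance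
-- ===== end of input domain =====

-- B replaces A's per-first-occurrence set rebuilding by precomputed prefix/suffix
-- distinct counts; return-value equivalence proved on Pre_ (n ≤ len(s)).

-- ===== PORT A =====
def Distinct_split (n : Int) (s : String) : Int :=
  let cs := s.toList
  let res := (PySem.List.pyRange 0 n 1).foldl (fun (st : Int × List Char) i =>
    let c := PySem.List.pyGetD cs i ' '   -- s[i]; in range under Pre_ (0 ≤ i < n ≤ len s)
    if c ∈ st.2 then st
    else
      (max st.1 (PySem.Set.len (PySem.Set.ofList (PySem.List.slice cs none (some (i+1)))) +
                 PySem.Set.len (PySem.Set.ofList (PySem.List.slice cs (some (i+1)) none))),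
       st.2 ++ [c]))
    (PySem.Set.len (PySem.Set.ofList cs), [])
  res.1

-- ===== PORT B =====
def Distinct_split_alt (n : Int) (s : String) : Int :=
  let cs := s.toList
  let m := cs.length
  -- pref[i] = len(seen) after adding s[0..i]
  let pref := (cs.foldl (fun (st : PySem.Set Char × List Int) c =>
      let seen := PySem.Set.add st.1 c
      (seen, st.2 ++ [PySem.Set.len seen])) (PySem.Set.empty, [])).2
  -- suf, built over reversed(s) then reversed; suf[i] = distinct count of s[i:]
  let suf := ((cs.reverse.foldl (fun (st : PySem.Set Char × List Int) c =>
      let seen := PySem.Set.add st.1 c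
      (seen, st.2 ++ [PySem.Set.len seen])) (PySem.Set.empty, [(0 : Int)])).2).reverse
  let res := (List.range m).foldl (fun (st : Int × Int) i =>
      let pi := pref.getD i 0            -- pref[i]; i < m always in range
      if st.2 < pi then                  -- pref[i] > prev: i is a first occurrence
        if (i : Int) < n then (max st.1 (pi + suf.getD (i+1) 0), pi)
        else (st.1, pi)
      else st) (suf.getD 0 0, 0)
  res.1

-- ===== PRECONDITION & SPEC =====
-- Pre_ excludes exactly the inputs with n > len(s), on which A's s[i] raises IndexError.
def Pre_Distinct_split (n : Int) (s : String) : Prop := n ≤ (s.toList.length : Int)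
instance (n : Int) (s : String) : Decidable (Pre_Distinct_split n s) := by
  unfold Pre_Distinct_split; infer_instance
def pvWitness_Distinct_split : Int × String := (3, "aba")

def Spec_Distinct_split (n : Int) (s : String) (out : Int) : Prop := out = Distinct_split_alt n s
instance (n : Int) (s : String) (out : Int) : Decidable (Spec_Distinct_split n s out) := by
  unfold Spec_Distinct_split; infer_instance

-- ===== CLAIM (what is proved, stated in full; the proofs are below) =====
def Claim_equal_Distinct_split : Prop := ∀ (n : Int) (s : String), Dom_Distinct_split n s →
  Pre_Distinct_split n s → Spec_Distinct_split n s (Distinct_split n s)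

-- ===== LEMMAS AND PROOFS =====

-- number of distinct elements of a list, as Int (= len(set(l)))
def dcount (l : List Char) : Int := PySem.Set.len (PySem.Set.ofList l)

-- common reference value: max over first-occurrence split points i < n of
-- dcount (take (i+1)) + dcount (drop (i+1)), starting from dcount of the whole list
def refF (cs : List Char) (n : Int) : Int :=
  (List.range cs.length).foldl (fun a i =>
    if cs.getD i ' ' ∉ cs.take i ∧ (i : Int) < n then
      max a (dcount (cs.take (i+1)) + dcount (cs.drop (i+1)))
    else a) (dcount cs)

lemma len_eq_length (t : PySem.Set Char) : PySem.Set.len t = (t.length : Int) := rfl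

lemma dcount_perm {l l' : List Char} (h : l.Perm l') : dcount l = dcount l' := by
  unfold dcount
  have h1 : (PySem.Set.ofList l).Perm (PySem.Set.ofList l') := by
    rw [List.perm_ext_iff_of_nodup (PySem.Set.nodup_ofList _) (PySem.Set.nodup_ofList _)]
    intro x
    simp only [PySem.Set.mem_ofList]
    exact h.mem_iff
  rw [len_eq_length, len_eq_length, h1.length_eq]

lemma dcount_append_singleton (l : List Char) (x : Char) :
    dcount (l ++ [x]) = dcount l + (if x ∈ l then 0 else 1) := by
  unfold dcount
  rw [PySem.Set.ofList_append_singleton]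
  by_cases hx : x ∈ l
  · rw [PySem.Set.add_of_mem (by simpa [PySem.Set.mem_ofList] using hx)]
    simp [hx]
  · rw [PySem.Set.add_of_not_mem (by simpa [PySem.Set.mem_ofList] using hx)]
    simp [hx]

lemma dcount_take_succ (cs : List Char) (i : Nat) (h : i < cs.length) :
    dcount (cs.take (i+1)) =
      dcount (cs.take i) + (if cs.getD i ' ' ∈ cs.take i then 0 else 1) := by
  have h1 : cs.take (i+1) = cs.take i ++ [cs.getD i ' '] := by
    rw [List.getD_eq_getElem cs ' ' h, List.take_add_one, List.getElem?_eq_getElem h]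
    rfl
  rw [h1]
  exact dcount_append_singleton (cs.take i) (cs.getD i ' ')

lemma dedup_take_succ (cs : List Char) (j : Nat) (h : j < cs.length) :
    PySem.List.dedup (cs.take (j+1)) =
      if cs.getD j ' ' ∈ cs.take j then PySem.List.dedup (cs.take j)
      else PySem.List.dedup (cs.take j) ++ [cs.getD j ' '] := by
  have h1 : cs.take (j+1) = cs.take j ++ [cs.getD j ' '] := by
    rw [List.getD_eq_getElem cs ' ' h, List.take_add_one, List.getElem?_eq_getElem h]
    rfl
  rw [h1]
  rw [PySem.List.dedup_eq_ofList, PySem.List.dedup_eq_ofList,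
      PySem.Set.ofList_append_singleton]
  by_cases hx : cs.getD j ' ' ∈ cs.take j
  · rw [PySem.Set.add_of_mem (by simpa [PySem.Set.mem_ofList] using hx), if_pos hx]
  · rw [PySem.Set.add_of_not_mem (by simpa [PySem.Set.mem_ofList] using hx), if_neg hx]

lemma foldl_fix {α β : Type} (l : List β) (g : α → β → α)
    (h : ∀ a x, x ∈ l → g a x = a) : ∀ a, l.foldl g a = a := by
  induction l with
  | nil => intro a; rfl
  | cons x t ih =>
      intro a
      simp only [List.foldl_cons]
      rw [h a x (by simp)]
      exact ih (fun a y hy => h a y (by simp [hy])) a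

lemma foldl_congr' {α β : Type} (l : List β) (f g : α → β → α)
    (h : ∀ a x, x ∈ l → f a x = g a x) : ∀ a, l.foldl f a = l.foldl g a := by
  induction l with
  | nil => intro a; rfl
  | cons x t ih =>
      intro a
      simp only [List.foldl_cons]
      rw [h a x (by simp)]
      exact ih (fun a y hy => h a y (by simp [hy])) _

-- the prefix-scan fold of B, characterised
lemma prefFold (l : List Char) : ∀ (s0 : PySem.Set Char) (acc : List Int),
    l.foldl (fun (st : PySem.Set Char × List Int) c =>
        (PySem.Set.add st.1 c, st.2 ++ [PySem.Set.len (PySem.Set.add st.1 c)])) (s0, acc)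
      = (PySem.Set.update s0 l,
         acc ++ (List.range l.length).map
           (fun i => PySem.Set.len (PySem.Set.update s0 (l.take (i+1))))) := by
  induction l with
  | nil => intro s0 acc; simp [PySem.Set.update_nil]
  | cons c t ih =>
      intro s0 acc
      simp only [List.foldl_cons]
      rw [ih (PySem.Set.add s0 c) (acc ++ [PySem.Set.len (PySem.Set.add s0 c)])]
      rw [PySem.Set.update_cons]
      congr 1
      rw [List.length_cons, List.range_succ_eq_map, List.map_cons, List.map_map]
      simp [Function.comp_def, List.take_succ_cons, PySem.Set.update_cons, PySem.Set.update_nil]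

lemma dcount_rev_take (cs : List Char) (j : Nat) (_hj : j ≤ cs.length) :
    dcount (cs.reverse.take (cs.length - j)) = dcount (cs.drop j) := by
  have h1 : cs.reverse.take (cs.length - j) = (cs.drop j).reverse := by
    have h2 : cs.reverse = (cs.drop j).reverse ++ (cs.take j).reverse := by
      rw [← List.reverse_append, List.take_append_drop]
    rw [h2]
    rw [List.take_append_of_le_length (by simp)]
    exact List.take_of_length_le (by simp)
  rw [h1]
  exact dcount_perm (List.reverse_perm _)

lemma suf_getD (cs : List Char) (j : Nat) (hj : j ≤ cs.length) :
    (((0:Int) :: (List.range cs.length).map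
        (fun i => dcount (cs.reverse.take (i+1)))).reverse).getD j 0
      = dcount (cs.drop j) := by
  rw [List.getD_eq_getElem?_getD, List.getElem?_reverse (by simp; omega)]
  simp only [List.length_cons, List.length_map, List.length_range]
  rcases Nat.lt_or_ge j cs.length with hlt | hge
  · have hidx : cs.length + 1 - 1 - j = (cs.length - j - 1) + 1 := by omega
    rw [hidx, List.getElem?_cons_succ, List.getElem?_map,
        List.getElem?_range (by omega)]
    simp only [Option.map_some, Option.getD_some]
    have h2 : cs.length - j - 1 + 1 = cs.length - j := by omega
    rw [h2, dcount_rev_take cs j hj]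
  · have hj' : j = cs.length := by omega
    subst hj'
    have hidx : cs.length + 1 - 1 - cs.length = 0 := by omega
    rw [hidx, List.getElem?_cons_zero]
    simp [List.drop_length, dcount, PySem.Set.len]

-- B's final loop, characterised against refF's step
lemma bloop (cs : List Char) (n : Int) (pref suf : List Int)
    (hpref : ∀ i, i < cs.length → pref.getD i 0 = dcount (cs.take (i+1)))
    (hsuf : ∀ j, j ≤ cs.length → suf.getD j 0 = dcount (cs.drop j)) :
    ∀ j, j ≤ cs.length →
    ((List.range j).foldl (fun (st : Int × Int) i =>
        if st.2 < pref.getD i 0 then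
          if (i : Int) < n then (max st.1 (pref.getD i 0 + suf.getD (i+1) 0), pref.getD i 0)
          else (st.1, pref.getD i 0)
        else st) (suf.getD 0 0, 0))
    = ((List.range j).foldl (fun a i =>
        if cs.getD i ' ' ∉ cs.take i ∧ (i : Int) < n then
          max a (dcount (cs.take (i+1)) + dcount (cs.drop (i+1))) else a) (dcount cs),
       dcount (cs.take j)) := by
  intro j
  induction j with
  | zero =>
      intro _
      simp only [List.range_zero, List.foldl_nil, List.take_zero]
      rw [hsuf 0 (by omega)]
      simp [dcount, PySem.Set.len]
  | succ j ih =>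
      intro hj
      have hjlt : j < cs.length := by omega
      rw [List.range_succ, List.foldl_append, List.foldl_append, ih (by omega)]
      simp only [List.foldl_cons, List.foldl_nil]
      rw [hpref j hjlt, dcount_take_succ cs j hjlt]
      by_cases hc : cs.getD j ' ' ∈ cs.take j
      · rw [if_pos hc]
        have hlt : ¬ (dcount (cs.take j) < dcount (cs.take j) + 0) := by omega
        rw [if_neg hlt]
        have hng : ¬ (cs.getD j ' ' ∉ cs.take j ∧ (j : Int) < n) := by
          rintro ⟨h1, -⟩; exact h1 hc
        rw [if_neg hng]
        simp
      · rw [if_neg hc]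
        have hlt : dcount (cs.take j) < dcount (cs.take j) + 1 := by omega
        rw [if_pos hlt]
        by_cases hn : (j : Int) < n
        · rw [if_pos hn, if_pos ⟨hc, hn⟩]
          rw [hsuf (j+1) (by omega)]
        · rw [if_neg hn]
          have hng : ¬ (cs.getD j ' ' ∉ cs.take j ∧ (j : Int) < n) := by
            rintro ⟨-, h2⟩; exact hn h2
          rw [if_neg hng]

-- A's loop, characterised (indices already mapped to Nat)
lemma aloop (cs : List Char) : ∀ j, j ≤ cs.length →
    ((List.range j).foldl (fun (st : Int × List Char) (i : Nat) =>
        if PySem.List.pyGetD cs (0 + (i : Int)) ' ' ∈ st.2 then st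
        else
          (max st.1 (PySem.Set.len (PySem.Set.ofList (PySem.List.slice cs none (some (0 + (i : Int) + 1)))) +
                     PySem.Set.len (PySem.Set.ofList (PySem.List.slice cs (some (0 + (i : Int) + 1)) none))),
           st.2 ++ [PySem.List.pyGetD cs (0 + (i : Int)) ' '])) (dcount cs, ([] : List Char)))
    = ((List.range j).foldl (fun a i =>
        if cs.getD i ' ' ∉ cs.take i then
          max a (dcount (cs.take (i+1)) + dcount (cs.drop (i+1))) else a) (dcount cs),
       PySem.List.dedup (cs.take j)) := by
  intro j
  induction j with
  | zero => simp [PySem.List.dedup]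
  | succ j ih =>
      intro hj
      have hjlt : j < cs.length := by omega
      rw [List.range_succ, List.foldl_append, List.foldl_append, ih (by omega)]
      simp only [List.foldl_cons, List.foldl_nil]
      have hget : PySem.List.pyGetD cs (0 + (j : Int)) ' ' = cs.getD j ' ' := by
        rw [zero_add, PySem.List.pyGetD_natCast]
      have hsl1 : PySem.List.slice cs none (some (0 + (j : Int) + 1)) = cs.take (j+1) := by
        have hcst : (0 + (j : Int) + 1) = ((j + 1 : Nat) : Int) := by push_cast; ring
        rw [hcst, PySem.List.slice_to_natCast]
      have hsl2 : PySem.List.slice cs (some (0 + (j : Int) + 1)) none = cs.drop (j+1) := by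
        have hcst : (0 + (j : Int) + 1) = ((j + 1 : Nat) : Int) := by push_cast; ring
        rw [hcst, PySem.List.slice_from_natCast]
      simp only [hget, hsl1, hsl2]
      have hmem : (cs.getD j ' ' ∈ PySem.List.dedup (cs.take j)) ↔ cs.getD j ' ' ∈ cs.take j :=
        PySem.List.mem_dedup _ _
      by_cases hc : cs.getD j ' ' ∈ cs.take j
      · rw [if_pos (hmem.mpr hc)]
        rw [if_neg (by simpa using hc)]
        rw [dedup_take_succ cs j hjlt, if_pos hc]
      · rw [if_neg (fun h => hc (hmem.mp h))]
        rw [if_pos (by simpa using hc)]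
        rw [dedup_take_succ cs j hjlt, if_neg hc]
        rfl

-- refF over range m with the i < n guard equals the guard-free fold over range n.toNat
lemma bridge (cs : List Char) (n : Int) (hpos : 0 < n) (hk : n.toNat ≤ cs.length) :
    refF cs n = (List.range n.toNat).foldl (fun a i =>
        if cs.getD i ' ' ∉ cs.take i then
          max a (dcount (cs.take (i+1)) + dcount (cs.drop (i+1))) else a) (dcount cs) := by
  unfold refF
  have hsplit : cs.length = n.toNat + (cs.length - n.toNat) := by omega
  rw [hsplit, List.range_add, List.foldl_append]
  rw [foldl_fix _ _ (fun a x hx => by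
    have hxn : n.toNat ≤ x := by
      simp only [List.mem_map, List.mem_range] at hx
      obtain ⟨i, -, hix⟩ := hx
      omega
    have hni : ¬ ((x : Int) < n) := by omega
    rw [if_neg (fun hh => hni hh.2)])]
  exact foldl_congr' _ _ _ (fun a x hx => by
    have hxn : x < n.toNat := List.mem_range.mp hx
    have hxi : (x : Int) < n := by omega
    by_cases hc : cs.getD x ' ' ∉ cs.take x
    · rw [if_pos ⟨hc, hxi⟩, if_pos hc]
    · rw [if_neg (fun hh => hc hh.1), if_neg hc]) _

-- B equals refF
lemma alt_eq_ref (n : Int) (s : String) : Distinct_split_alt n s = refF s.toList n := by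
  unfold Distinct_split_alt
  simp only []
  rw [prefFold, prefFold]
  simp only []
  have hpref : ∀ i, i < s.toList.length →
      (([] : List Int) ++ (List.range s.toList.length).map
        (fun i => PySem.Set.len (PySem.Set.update PySem.Set.empty (s.toList.take (i+1))))).getD i 0
      = dcount (s.toList.take (i+1)) := by
    intro i hi
    rw [List.nil_append, List.getD_eq_getElem _ _ (by simpa using hi), List.getElem_map,
        List.getElem_range, PySem.Set.update_empty]
    rfl
  have hsufeq : (([(0:Int)] ++ (List.range s.toList.reverse.length).map
        (fun i => PySem.Set.len (PySem.Set.update PySem.Set.empty (s.toList.reverse.take (i+1))))))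
      = ((0:Int) :: (List.range s.toList.length).map
        (fun i => dcount (s.toList.reverse.take (i+1)))) := by
    simp only [List.length_reverse, List.cons_append, List.nil_append, List.cons.injEq, true_and]
    apply List.map_congr_left
    intro i _
    rw [PySem.Set.update_empty]
    rfl
  rw [hsufeq]
  have hsuf : ∀ j, j ≤ s.toList.length →
      (((0:Int) :: (List.range s.toList.length).map
        (fun i => dcount (s.toList.reverse.take (i+1)))).reverse).getD j 0
      = dcount (s.toList.drop j) := fun j hj => suf_getD s.toList j hj
  rw [bloop s.toList n _ _ hpref hsuf s.toList.length (le_refl _)]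
  rfl

-- A equals refF under Pre_
lemma a_eq_ref (n : Int) (s : String) (hpre : n ≤ (s.toList.length : Int)) :
    Distinct_split n s = refF s.toList n := by
  unfold Distinct_split
  simp only []
  by_cases hn : n ≤ 0
  · rw [PySem.List.pyRange_one_eq_nil hn, List.foldl_nil]
    unfold refF
    rw [foldl_fix _ _ (fun a x hx => by
      have hni : ¬ ((x : Int) < n) := by omega
      rw [if_neg (fun hh => hni hh.2)])]
    rfl
  · have hn' : 0 < n := by omega
    rw [PySem.List.pyRange_one]
    simp only [List.foldl_map]
    have hzero : (n - 0).toNat = n.toNat := by omega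
    rw [hzero]
    have hk : n.toNat ≤ s.toList.length := by omega
    rw [show (PySem.Set.ofList s.toList).len = dcount s.toList from rfl]
    rw [aloop s.toList n.toNat hk]
    rw [bridge s.toList n hn' hk]

-- ===== VERDICT (by name: the statement is the Claim_ definition above) =====
theorem Distinct_split_spec : Claim_equal_Distinct_split := by
  intro n s _ hpre
  unfold Spec_Distinct_split
  rw [a_eq_ref n s hpre, alt_eq_ref]
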